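-- pv_equiv track=rewrite | github.com/deltahdl/deltahdl | scripts/implement_subclause/__init__.py | build_action_summary
-- ===== SOURCE A (Python) =====
-- def build_action_summary(added, modified, deleted) -> str:
--     """Build a deterministic bullet list from filtered git changes."""
--     bullets: list[str] = []
--     for path in sorted(added):
--         bullets.append(f"- Added {path}")
--     for path in sorted(modified):
--         bullets.append(f"- Modified {path}")
--     for path in sorted(deleted):
--         bullets.append(f"- Deleted {path}")
--     return "\n".join(bullets)
-- ===== SOURCE B (Python) =====
-- def _verb(rank):
--     return "Added" if rank == 0 else ("Modified" if rank == 1 else "Deleted")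
--
--
-- def build_action_summary(added, modified, deleted) -> str:
--     """Build a deterministic bullet list from filtered git changes."""
--     entries = sorted(
--         [(0, p) for p in added]
--         + [(1, p) for p in modified]
--         + [(2, p) for p in deleted]
--     )
--     return "\n".join(f"- {_verb(r)} {p}" for r, p in entries)
-- ===== Notes on version B (the rewrite author's own statement) =====
-- stated objective: alternative
-- what changed: Replaces three separate per-group sorts appended into a bullets accumulator with one combined sort of rank-tagged (rank, path) pairs under the composite key, formatting verbs from the rank afterwards.
import Mathlib
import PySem

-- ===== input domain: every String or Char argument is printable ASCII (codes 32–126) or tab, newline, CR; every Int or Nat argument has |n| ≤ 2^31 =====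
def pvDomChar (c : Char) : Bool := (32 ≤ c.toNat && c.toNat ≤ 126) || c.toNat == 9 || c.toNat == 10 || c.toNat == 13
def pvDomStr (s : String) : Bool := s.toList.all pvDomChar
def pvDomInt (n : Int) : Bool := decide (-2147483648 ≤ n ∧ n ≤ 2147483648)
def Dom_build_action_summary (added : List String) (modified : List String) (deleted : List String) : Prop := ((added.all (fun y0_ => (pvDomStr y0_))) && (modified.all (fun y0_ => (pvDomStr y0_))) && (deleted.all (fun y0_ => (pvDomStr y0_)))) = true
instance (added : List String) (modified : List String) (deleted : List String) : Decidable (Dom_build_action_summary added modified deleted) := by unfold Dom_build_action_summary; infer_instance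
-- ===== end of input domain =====

-- B replaces A's three per-group sorts appended in sequence by one combined sort of
-- rank-tagged (rank, path) pairs under the composite (rank, path) key; same cost, alternative decomposition.


-- ===== PORT A =====
-- three sorted loops appending bullets, then "\n".join
def build_action_summary (added : List String) (modified : List String) (deleted : List String) : String :=
  let bullets : List String := []
  let bullets := (PySem.List.sorted added (fun x => x)).foldl (fun acc path => acc ++ ["- Added " ++ path]) bullets
  let bullets := (PySem.List.sorted modified (fun x => x)).foldl (fun acc path => acc ++ ["- Modified " ++ path]) bullets
  let bullets := (PySem.List.sorted deleted (fun x => x)).foldl (fun acc path => acc ++ ["- Deleted " ++ path]) bullets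
  PySem.Str.join "\n" bullets

-- ===== PORT B =====
-- conditional-expression chain of Source B's _verb
def pyVerb (rank : Int) : String :=
  if rank = 0 then "Added" else if rank = 1 then "Modified" else "Deleted"

def build_action_summary_alt (added : List String) (modified : List String) (deleted : List String) : String :=
  let entries := PySem.List.sorted2
      (added.map (fun p => ((0 : Int), p)) ++ modified.map (fun p => ((1 : Int), p)) ++ deleted.map (fun p => ((2 : Int), p)))
      (fun e => e.1) (fun e => e.2)
  PySem.Str.join "\n" (entries.map (fun e => "- " ++ pyVerb e.1 ++ " " ++ e.2))

-- ===== PRECONDITION & SPEC =====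
def Spec_build_action_summary (added : List String) (modified : List String) (deleted : List String) (out : String) : Prop := out = build_action_summary_alt added modified deleted
instance (added : List String) (modified : List String) (deleted : List String) (out : String) : Decidable (Spec_build_action_summary added modified deleted out) := by unfold Spec_build_action_summary; infer_instance

-- ===== CLAIM (what is proved, stated in full; the proofs are below) =====
def Claim_equal_build_action_summary : Prop := ∀ (added : List String) (modified : List String) (deleted : List String), Dom_build_action_summary added modified deleted → Spec_build_action_summary added modified deleted (build_action_summary added modified deleted)

-- ===== LEMMAS AND PROOFS =====

-- the lexicographic (rank, path) comparator that sorted2 uses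
def pvLt (a b : Int × String) : Bool :=
  decide (a.1 < b.1) || (!decide (b.1 < a.1) && decide (a.2 < b.2))

theorem pv_sorted2_eq (xs : List (Int × String)) :
    PySem.List.sorted2 xs (fun e => e.1) (fun e => e.2)
      = xs.foldl (fun acc x => PySem.List.insertBy pvLt x acc) [] := by
  rfl

theorem pv_insertBy_append {α : Type} (before : α → α → Bool) (x : α) (l1 l2 : List α)
    (h : ∀ a ∈ l1, before x a = false) :
    PySem.List.insertBy before x (l1 ++ l2) = l1 ++ PySem.List.insertBy before x l2 := by
  induction l1 with
  | nil => simp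
  | cons a l1 ih =>
    have ha : before x a = false := h a (by simp)
    simp [PySem.List.insertBy, ha, ih (fun b hb => h b (by simp [hb]))]

theorem pv_foldl_ins_append {α : Type} (before : α → α → Bool) (ys S : List α)
    (h : ∀ y ∈ ys, ∀ a ∈ S, before y a = false) (t : List α) :
    ys.foldl (fun acc x => PySem.List.insertBy before x acc) (S ++ t)
      = S ++ ys.foldl (fun acc x => PySem.List.insertBy before x acc) t := by
  induction ys generalizing t with
  | nil => simp
  | cons y ys ih =>
    simp only [List.foldl_cons]
    rw [pv_insertBy_append before y S t (fun a ha => h y (by simp) a ha)]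
    exact ih (fun y' hy' a ha => h y' (by simp [hy']) a ha) _

theorem pv_insertBy_map {α β : Type} (before : β → β → Bool) (f : α → β) (x : α) (t : List α) :
    PySem.List.insertBy before (f x) (t.map f)
      = (PySem.List.insertBy (fun a b => before (f a) (f b)) x t).map f := by
  induction t with
  | nil => simp [PySem.List.insertBy]
  | cons a t ih =>
    by_cases hb : before (f x) (f a)
    · simp [PySem.List.insertBy, hb]
    · simp [PySem.List.insertBy, hb, ih]

theorem pv_foldl_ins_map {α β : Type} (before : β → β → Bool) (f : α → β) (ys : List α) (t : List α) :
    (ys.map f).foldl (fun acc x => PySem.List.insertBy before x acc) (t.map f)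
      = (ys.foldl (fun acc x => PySem.List.insertBy (fun a b => before (f a) (f b)) x acc) t).map f := by
  induction ys generalizing t with
  | nil => simp
  | cons y ys ih =>
    simp only [List.map_cons, List.foldl_cons]
    rw [pv_insertBy_map]
    exact ih _

theorem pv_block (r : Int) (l : List String) :
    (l.map (fun p => (r, p))).foldl (fun acc x => PySem.List.insertBy pvLt x acc) []
      = (PySem.List.sorted l (fun x => x)).map (fun p => (r, p)) := by
  have h := pv_foldl_ins_map pvLt (fun p => (r, p)) l []
  simp only [List.map_nil] at h
  rw [h]
  have hcmp : (fun a b : String => pvLt (r, a) (r, b)) = fun a b => decide (a < b) := by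
    funext a b; simp [pvLt]
  rw [hcmp, ← PySem.List.sorted_eq_foldl_insertBy]

theorem pv_key_eq (added modified deleted : List String) :
    PySem.List.sorted2
      (added.map (fun p => ((0 : Int), p)) ++ modified.map (fun p => ((1 : Int), p)) ++ deleted.map (fun p => ((2 : Int), p)))
      (fun e => e.1) (fun e => e.2)
    = (PySem.List.sorted added (fun x => x)).map (fun p => ((0 : Int), p))
      ++ (PySem.List.sorted modified (fun x => x)).map (fun p => ((1 : Int), p))
      ++ (PySem.List.sorted deleted (fun x => x)).map (fun p => ((2 : Int), p)) := by
  rw [pv_sorted2_eq, List.foldl_append, List.foldl_append, pv_block 0 added]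
  have mem0 : ∀ a ∈ (PySem.List.sorted added (fun x => x)).map (fun p => ((0 : Int), p)), a.1 = 0 := by
    intro a ha; obtain ⟨p, _, rfl⟩ := List.mem_map.mp ha; rfl
  have mem1 : ∀ a ∈ (PySem.List.sorted modified (fun x => x)).map (fun p => ((1 : Int), p)), a.1 = 1 := by
    intro a ha; obtain ⟨p, _, rfl⟩ := List.mem_map.mp ha; rfl
  have hlt : ∀ (i j : Int), i < j → ∀ (y a : Int × String), y.1 = j → a.1 = i → pvLt y a = false := by
    intro i j hij y a hy ha
    simp only [pvLt, hy, ha, Bool.or_eq_false_iff, Bool.and_eq_false_iff, decide_eq_false_iff_not,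
      Bool.not_eq_eq_eq_not, Bool.not_false, decide_eq_true_iff]
    exact ⟨by omega, Or.inl (by omega)⟩
  rw [show (PySem.List.sorted added (fun x => x)).map (fun p => ((0 : Int), p))
      = (PySem.List.sorted added (fun x => x)).map (fun p => ((0 : Int), p)) ++ [] from (List.append_nil _).symm,
     pv_foldl_ins_append pvLt _ _ (by
      intro y hy a ha
      obtain ⟨p, _, rfl⟩ := List.mem_map.mp hy
      exact hlt 0 1 (by norm_num) _ _ rfl (mem0 a ha)) [],
     pv_block 1 modified]
  rw [show (PySem.List.sorted added (fun x => x)).map (fun p => ((0 : Int), p))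
        ++ (PySem.List.sorted modified (fun x => x)).map (fun p => ((1 : Int), p))
      = ((PySem.List.sorted added (fun x => x)).map (fun p => ((0 : Int), p))
        ++ (PySem.List.sorted modified (fun x => x)).map (fun p => ((1 : Int), p))) ++ [] from (List.append_nil _).symm,
     pv_foldl_ins_append pvLt _ _ (by
      intro y hy a ha
      obtain ⟨p, _, rfl⟩ := List.mem_map.mp hy
      rcases List.mem_append.mp ha with h0 | h1
      · exact hlt 0 2 (by norm_num) _ _ rfl (mem0 a h0)
      · exact hlt 1 2 (by norm_num) _ _ rfl (mem1 a h1)) [],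
     pv_block 2 deleted]
  simp [List.append_assoc]

-- ===== VERDICT (by name: the statement is the Claim_ definition above) =====
theorem build_action_summary_spec : Claim_equal_build_action_summary := by
  intro added modified deleted _
  unfold Spec_build_action_summary build_action_summary build_action_summary_alt
  rw [pv_key_eq]
  simp only [PySem.List.foldl_append_singleton_eq_map, List.nil_append, List.map_append,
    List.map_map, List.append_assoc]
  congr 1
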